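-- pv_equiv track=rewrite | github.com/jongheonleee/Backjun_Programmers | 프로그래머스/lv3/43164. 여행경로/여행경로.py | solution
-- ===== SOURCE A (Python) =====
-- def solution(tickets):
--     graph = {t[0]:[] for t in tickets}
--     for t in tickets:
--         graph[t[0]].append(t[1])
--
--     for k in graph.keys():
--         graph[k].sort(reverse=True)
--
--     res, st = [], ['ICN']
--     while st:
--         peek = st[-1]
--
--         if peek not in graph or len(graph[peek]) == 0:
--             res.append(st.pop())
--
--         else:
--             st.append(graph[peek].pop())
--
--     res.reverse()
--     return res
-- ===== SOURCE B (Python) =====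
-- def solution(tickets):
--     # Recursive Hierholzer: post-order DFS consuming edges, then reverse.
--     graph = {}
--     for t in tickets:
--         graph.setdefault(t[0], []).append(t[1])
--     for adj in graph.values():
--         adj.sort(reverse=True)
--     res = []
--
--     def dfs(node):
--         while node in graph and graph[node]:
--             dfs(graph[node].pop())
--         res.append(node)
--
--     dfs('ICN')
--     res.reverse()
--     return res
-- ===== Notes on version B (the rewrite author's own statement) =====
-- stated objective: alternative
-- what changed: Replaces A's explicit-stack iterative Eulerian-path walk (and its separate key-creation pass) with a recursive Hierholzer DFS that consumes edges and appends nodes post-order, building the graph in one setdefault pass.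
import Mathlib
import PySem

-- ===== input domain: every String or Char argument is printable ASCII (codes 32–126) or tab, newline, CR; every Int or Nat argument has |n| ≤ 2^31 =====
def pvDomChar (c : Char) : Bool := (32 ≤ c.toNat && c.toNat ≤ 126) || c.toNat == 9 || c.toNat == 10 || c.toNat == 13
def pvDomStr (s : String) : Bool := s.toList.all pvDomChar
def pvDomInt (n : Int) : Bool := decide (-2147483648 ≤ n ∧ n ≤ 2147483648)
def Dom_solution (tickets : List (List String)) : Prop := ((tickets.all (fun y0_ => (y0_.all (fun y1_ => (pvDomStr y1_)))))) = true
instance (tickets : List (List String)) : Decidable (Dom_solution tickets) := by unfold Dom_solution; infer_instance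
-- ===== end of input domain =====

-- B replaces A's explicit-stack loop by a recursive Hierholzer DFS (and builds the graph
-- in one setdefault pass instead of two); objective: alternative decomposition, same cost.

-- ===== PORT A =====
-- t[0] / t[1]; Pre_solution guarantees the index is in range, so the default is never used
def keyT (t : List String) : String := (PySem.List.pyGet? t 0).getD ""
def dstT (t : List String) : String := (PySem.List.pyGet? t 1).getD ""

-- measure used only for termination: total number of edges left in the graph
def ec (g : PySem.Dict String (List String)) : Nat :=
  ((PySem.List.dedup g.keys).map (fun k => (g.getD k []).length)).sum

theorem sum_map_lt_of_nodup (ks : List String) (f f' : String → Nat) (k : String)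
    (hnd : ks.Nodup) (hk : k ∈ ks) (hne : ∀ j ∈ ks, j ≠ k → f' j = f j) (hlt : f' k < f k) :
    (ks.map f').sum < (ks.map f).sum := by
  induction ks with
  | nil => simp at hk
  | cons x t ih =>
    rcases List.nodup_cons.mp hnd with ⟨hxnt, hndt⟩
    rcases List.mem_cons.mp hk with hk | hk
    · subst hk
      have : t.map f' = t.map f := by
        apply List.map_congr_left
        intro j hj
        exact hne j (List.mem_cons_of_mem _ hj) (by rintro rfl; exact hxnt hj)
      simp [this]
      omega
    · have hxk : x ≠ k := by rintro rfl; exact hxnt hk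
      have : f' x = f x := hne x (List.mem_cons_self) hxk
      simp only [List.map_cons, List.sum_cons, this]
      have := ih hndt hk (fun j hj hjk => hne j (List.mem_cons_of_mem _ hj) hjk)
      omega

theorem ec_insert_lt (g : PySem.Dict String (List String)) (k : String) (l' : List String)
    (hc : g.contains k = true) (hl : l'.length < (g.getD k []).length) :
    ec (g.insert k l') < ec g := by
  unfold ec
  rw [PySem.Dict.keys_insert_of_contains g l' hc]
  apply sum_map_lt_of_nodup _ _ _ k
  · exact PySem.List.nodup_dedup _
  · rw [PySem.List.mem_dedup]
    exact (PySem.Dict.contains_iff_mem_keys g k).mp hc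
  · intro j _ hjk
    rw [PySem.Dict.getD_insert]
    simp [hjk]
  · rw [PySem.Dict.getD_insert]
    simp [hl]

def runA (g : PySem.Dict String (List String)) (st res : List String) : List String :=
  match st with
  | [] => res.reverse
  | peek :: rest =>
    if !g.contains peek || (g.getD peek []).length == 0 then
      runA g rest (res ++ [peek])
    else
      match h : PySem.List.pop? (g.getD peek []) (-1) with
      | some (v, l') => runA (g.insert peek l') (v :: peek :: rest) res
      | none => res.reverse   -- unreachable: the list is non-empty here
termination_by 2 * ec g + st.length
decreasing_by
  · simp only [List.length_cons]; omega
  · have hlen : l'.length + 1 = (g.getD peek []).length :=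
      PySem.List.length_of_pop?_eq_some _ h
    have hc : g.contains peek = true := by
      rename_i hcond
      simp only [Bool.not_eq_true', Bool.or_eq_true, beq_iff_eq] at hcond
      push Not at hcond
      simpa using hcond.1
    have := ec_insert_lt g peek l' hc (by omega)
    simp only [List.length_cons]
    omega

-- graph = {t[0]: [] for t in tickets}
def graphA0 (tickets : List (List String)) : PySem.Dict String (List String) :=
  tickets.foldl (fun d t => d.insert (keyT t) ([] : List String)) PySem.Dict.empty
-- for t in tickets: graph[t[0]].append(t[1])   (key always present; modify = in-place append)
def graphA1 (tickets : List (List String)) : PySem.Dict String (List String) :=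
  tickets.foldl (fun d t => d.modify (keyT t) [] (· ++ [dstT t])) (graphA0 tickets)
-- for k in graph.keys(): graph[k].sort(reverse=True)
def graphA2 (tickets : List (List String)) : PySem.Dict String (List String) :=
  (graphA1 tickets).keys.foldl
    (fun d k => d.modify k [] (fun l => PySem.List.sorted l (fun x => x) true)) (graphA1 tickets)

def solution (tickets : List (List String)) : List String :=
  runA (graphA2 tickets) ["ICN"] []

-- ===== PORT B =====
-- graph = {}; for t in tickets: graph.setdefault(t[0], []).append(t[1])
def buildB (tickets : List (List String)) : PySem.Dict String (List String) :=
  tickets.foldl (fun d t => d.modify (keyT t) [] (· ++ [dstT t])) PySem.Dict.empty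

-- for adj in graph.values(): adj.sort(reverse=True)
def sortVals (g : PySem.Dict String (List String)) : PySem.Dict String (List String) :=
  PySem.Dict.mk (g.items.map (fun p => (p.1, PySem.List.sorted p.2 (fun x => x) true)))

-- dfs(node): while node in graph and graph[node]: dfs(graph[node].pop()); res.append(node)
-- returns the updated graph and the res segment appended by this call (subtype only for termination)
def dfs (g : PySem.Dict String (List String)) (node : String) :
    {p : PySem.Dict String (List String) × List String // ec p.1 ≤ ec g} :=
  if hc : g.contains node = true ∧ g.getD node [] ≠ [] then
    match h : PySem.List.pop? (g.getD node []) (-1) with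
    | none => ⟨(g, [node]), le_rfl⟩   -- unreachable: the list is non-empty here
    | some (v, l') =>
      have hlt : ec (g.insert node l') < ec g := by
        have hlen : l'.length + 1 = (g.getD node []).length :=
          PySem.List.length_of_pop?_eq_some _ h
        exact ec_insert_lt g node l' hc.1 (by omega)
      match dfs (g.insert node l') v with
      | ⟨(g2, r1), h1⟩ =>
        match dfs g2 node with
        | ⟨(g3, r2), h2⟩ =>
          ⟨(g3, r1 ++ r2), le_of_lt (lt_of_le_of_lt (le_trans h2 h1) hlt)⟩
  else ⟨(g, [node]), le_rfl⟩
termination_by ec g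
decreasing_by
  · exact hlt
  · exact lt_of_le_of_lt h1 hlt

def solution_alt (tickets : List (List String)) : List String :=
  ((dfs (sortVals (buildB tickets)) "ICN").val.2).reverse

-- ===== PRECONDITION & SPEC =====
-- Pre_ excludes tickets shorter than 2 entries, on which Python A raises IndexError (t[0]/t[1]).
def Pre_solution (tickets : List (List String)) : Prop := ∀ t ∈ tickets, 2 ≤ t.length
instance (tickets : List (List String)) : Decidable (Pre_solution tickets) := by
  unfold Pre_solution; infer_instance
def pvWitness_solution : List (List String) := [["ICN", "AAA"], ["AAA", "ICN"]]
def Spec_solution (tickets : List (List String)) (out : List String) : Prop := out = solution_alt tickets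
instance (tickets : List (List String)) (out : List String) : Decidable (Spec_solution tickets out) := by
  unfold Spec_solution; infer_instance

-- ===== CLAIM (what is proved, stated in full; the proofs are below) =====
def Claim_equal_solution : Prop := ∀ (tickets : List (List String)), Dom_solution tickets → Pre_solution tickets → Spec_solution tickets (solution tickets)

-- ===== LEMMAS AND PROOFS =====


-- keys of the two build styles
theorem update_of_subset (s xs : List String) (hsub : ∀ y ∈ xs, y ∈ s) :
    PySem.Set.update s xs = s := by
  rw [PySem.Set.update_eq_append_filter]
  have h : List.filter (fun y => !(PySem.Set.contains s y)) (PySem.Set.ofList xs) = [] := by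
    rw [List.filter_eq_nil_iff]
    intro a ha
    have ha' : a ∈ s := hsub a ((PySem.Set.mem_ofList xs a).mp ha)
    simp [PySem.Set.contains_eq_listContains, ha']
  rw [h, List.append_nil]

theorem keys_graphA0 (tickets : List (List String)) :
    (graphA0 tickets).keys = PySem.Set.ofList (tickets.map keyT) := by
  unfold graphA0
  rw [PySem.Dict.keys_foldl_insert_key tickets keyT (fun _ _ => ([] : List String))]
  rw [PySem.Dict.keys_empty, PySem.Set.update_nil_left]

theorem keys_graphA1 (tickets : List (List String)) :
    (graphA1 tickets).keys = PySem.Set.ofList (tickets.map keyT) := by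
  unfold graphA1
  rw [PySem.Dict.keys_foldl_modify_key tickets keyT ([] : List String)
      (fun _ t => (· ++ [dstT t]))]
  rw [keys_graphA0, update_of_subset _ _ (fun y hy => (PySem.Set.mem_ofList _ y).mpr hy)]

theorem keys_buildB (tickets : List (List String)) :
    (buildB tickets).keys = PySem.Set.ofList (tickets.map keyT) := by
  unfold buildB
  rw [PySem.Dict.keys_foldl_modify_key tickets keyT ([] : List String)
      (fun _ t => (· ++ [dstT t]))]
  rw [PySem.Dict.keys_empty, PySem.Set.update_nil_left]

theorem nodup_keys_buildB (tickets : List (List String)) : (buildB tickets).keys.Nodup := by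
  rw [keys_buildB]; exact PySem.Set.nodup_ofList _

-- every value of the first A pass is []
theorem getD_insert_nil_fold (ts : List (List String)) :
    ∀ (d : PySem.Dict String (List String)), (∀ c, d.getD c [] = []) →
    ∀ c, (ts.foldl (fun d t => d.insert (keyT t) ([] : List String)) d).getD c [] = [] := by
  induction ts with
  | nil => intro d h c; exact h c
  | cons t ts ih =>
    intro d h c
    simp only [List.foldl_cons]
    refine ih _ (fun c' => ?_) c
    rw [PySem.Dict.getD_insert]
    split <;> simp [h]

theorem getD_graphA0 (tickets : List (List String)) (c : String) :
    (graphA0 tickets).getD c [] = [] :=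
  getD_insert_nil_fold tickets PySem.Dict.empty (fun c => PySem.Dict.getD_empty c []) c

-- the append pass, expressed through getD_foldl_modify_append
theorem getD_modify_fold (tickets : List (List String))
    (d : PySem.Dict String (List String)) (c : String) :
    (tickets.foldl (fun d t => d.modify (keyT t) [] (· ++ [dstT t])) d).getD c []
      = d.getD c []
        ++ ((tickets.map (fun t => (keyT t, dstT t))).filter (fun p => p.1 == c)).map (·.2) := by
  have : tickets.foldl (fun d t => d.modify (keyT t) [] (· ++ [dstT t])) d
      = (tickets.map (fun t => (keyT t, dstT t))).foldl
          (fun d p => d.modify p.1 [] (· ++ [p.2])) d := by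
    rw [List.foldl_map]
  rw [this, PySem.Dict.getD_foldl_modify_append]

theorem getD_graphA1_eq_buildB (tickets : List (List String)) (c : String) :
    (graphA1 tickets).getD c [] = (buildB tickets).getD c [] := by
  unfold graphA1 buildB
  rw [getD_modify_fold, getD_modify_fold]
  rw [getD_graphA0 tickets c, PySem.Dict.getD_empty]

theorem graphs_eq (tickets : List (List String)) : graphA1 tickets = buildB tickets := by
  apply PySem.Dict.ext
  have hkA : (graphA1 tickets).keys = PySem.Set.ofList (tickets.map keyT) := keys_graphA1 tickets
  have hkB : (buildB tickets).keys = PySem.Set.ofList (tickets.map keyT) := keys_buildB tickets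
  rw [PySem.Dict.items_eq_map_keys (graphA1 tickets) (by rw [hkA]; exact PySem.Set.nodup_ofList _) [],
      PySem.Dict.items_eq_map_keys (buildB tickets) (by rw [hkB]; exact PySem.Set.nodup_ofList _) []]
  rw [hkA, hkB]
  apply List.map_congr_left
  intro k _
  rw [getD_graphA1_eq_buildB]

-- the per-key sorting pass, on each side
theorem getD_sort_fold (f : List String → List String) :
    ∀ (ks : List String), ks.Nodup → ∀ (d : PySem.Dict String (List String)) (c : String),
    (ks.foldl (fun d k => d.modify k [] f) d).getD c []
      = if c ∈ ks then f (d.getD c []) else d.getD c [] := by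
  intro ks
  induction ks with
  | nil => intro _ d c; simp
  | cons x t ih =>
    intro hnd d c
    rcases List.nodup_cons.mp hnd with ⟨hxt, hndt⟩
    simp only [List.foldl_cons]
    rw [ih hndt]
    by_cases hcx : c = x
    · subst hcx
      simp [hxt]
    · rw [PySem.Dict.getD_modify]
      simp [hcx, List.mem_cons]

theorem get?_mk_map (f : List String → List String) (l : List (String × List String)) (c : String) :
    (PySem.Dict.mk (l.map (fun p => (p.1, f p.2)))).get? c
      = ((PySem.Dict.mk l).get? c).map f := by
  induction l with
  | nil => simp [PySem.Dict.get?]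
  | cons p t ih =>
    simp only [List.map_cons]
    rw [PySem.Dict.get?_mk_cons, PySem.Dict.get?_mk_cons]
    split <;> simp [ih]

theorem getD_sortVals (D : PySem.Dict String (List String)) (c : String) :
    (sortVals D).getD c []
      = ((D.get? c).map (fun l => PySem.List.sorted l (fun x => x) true)).getD [] := by
  unfold sortVals PySem.Dict.getD
  rw [get?_mk_map (fun l => PySem.List.sorted l (fun x => x) true) D.items c]

theorem keys_sortVals (D : PySem.Dict String (List String)) : (sortVals D).keys = D.keys := by
  unfold sortVals
  rw [PySem.Dict.keys_mk]
  rw [List.map_map]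
  rfl

theorem sorted_graphs_eq (D : PySem.Dict String (List String)) (hnd : D.keys.Nodup) :
    D.keys.foldl (fun d k => d.modify k [] (fun l => PySem.List.sorted l (fun x => x) true)) D
    = sortVals D := by
  apply PySem.Dict.ext
  have hkL : (D.keys.foldl
      (fun d k => d.modify k [] (fun l => PySem.List.sorted l (fun x => x) true)) D).keys
      = D.keys := by
    rw [PySem.Dict.keys_foldl_modify D.keys ([] : List String) (fun _ _ => fun l => PySem.List.sorted l (fun x => x) true)]
    exact update_of_subset D.keys D.keys (fun y hy => hy)
  rw [PySem.Dict.items_eq_map_keys _ (by rw [hkL]; exact hnd) [],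
      PySem.Dict.items_eq_map_keys _ (by rw [keys_sortVals]; exact hnd) []]
  rw [hkL, keys_sortVals]
  apply List.map_congr_left
  intro k hk
  rw [getD_sort_fold _ D.keys hnd, if_pos hk, getD_sortVals]
  have : D.get? k = some (D.getD k []) := by
    rcases hg : D.get? k with _ | v
    · exact absurd hk ((PySem.Dict.get?_eq_none_iff_not_mem_keys D k).mp hg)
    · simp [PySem.Dict.getD, hg]
  rw [this]
  rfl

theorem sim (g : PySem.Dict String (List String)) (node : String) (rest res : List String) :
    runA g (node :: rest) res = runA (dfs g node).val.1 rest (res ++ (dfs g node).val.2) := by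
  by_cases hc : g.contains node = true ∧ g.getD node [] ≠ []
  · rcases List.eq_nil_or_concat (g.getD node []) with hnil | ⟨ys, y, hxs⟩
    · exact absurd hnil hc.2
    · rw [List.concat_eq_append] at hxs
      have hpop : PySem.List.pop? (g.getD node []) (-1) = some (y, ys) := by
        rw [hxs]; exact PySem.List.pop?_last ys y
      have hlt : ec (g.insert node ys) < ec g :=
        ec_insert_lt g node ys hc.1 (by rw [hxs]; simp)
      have hcond : (!g.contains node || ((g.getD node []).length == 0)) = false := by
        simp [hc.1, hxs]
      rcases hd1 : dfs (g.insert node ys) y with ⟨⟨g2, r1⟩, h1⟩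
      rcases hd2 : dfs g2 node with ⟨⟨g3, r2⟩, h2⟩
      have hdfs : (dfs g node).val = (g3, r1 ++ r2) := by
        conv_lhs => rw [dfs]
        rw [dif_pos hc]
        split
        · rename_i hp
          rw [hpop] at hp
          cases hp
        · rename_i v l' hp
          rw [hpop] at hp
          injection hp with hp
          cases hp
          rw [hd1]
          simp only
          rw [hd2]
      calc runA g (node :: rest) res
          = runA (g.insert node ys) (y :: node :: rest) res := by
            rw [runA]
            rw [hcond]
            simp only [Bool.false_eq_true, if_false]
            rw [hpop]
        _ = runA g2 (node :: rest) (res ++ r1) := by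
            have hs := sim (g.insert node ys) y (node :: rest) res
            rw [hd1] at hs
            exact hs
        _ = runA g3 rest (res ++ r1 ++ r2) := by
            have hs := sim g2 node rest (res ++ r1)
            rw [hd2] at hs
            exact hs
        _ = runA (dfs g node).val.1 rest (res ++ (dfs g node).val.2) := by
            rw [hdfs, List.append_assoc]
  · have hcond : (!g.contains node || ((g.getD node []).length == 0)) = true := by
      by_cases h1 : g.contains node = true
      · have h2 : g.getD node [] = [] := by
          by_contra h3
          exact hc ⟨h1, h3⟩
        simp [h2]
      · simp [h1]
    have hdfs : (dfs g node).val = (g, [node]) := by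
      rw [dfs, dif_neg hc]
    rw [runA, hcond]
    simp only [if_true]
    rw [hdfs]
termination_by ec g
decreasing_by
  · exact hlt
  · have h1' : ec g2 ≤ ec (g.insert node ys) := by
      have := (dfs (g.insert node ys) y).property
      rw [hd1] at this
      exact this
    exact lt_of_le_of_lt h1' hlt

-- ===== VERDICT (by name: the statement is the Claim_ definition above) =====
theorem solution_spec : Claim_equal_solution := by
  intro tickets _ _
  unfold Spec_solution solution solution_alt graphA2
  rw [graphs_eq, sorted_graphs_eq _ (nodup_keys_buildB tickets), sim]
  simp [runA]
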